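-- pv_equiv track=rewrite | github.com/pypi-data/pypi-mirror-361 | packages/chunkhound/chunkhound-2.7.0-py3-none-any.whl/chunkhound/mcp_server.py | truncate_code
-- ===== SOURCE A (Python) =====
-- def truncate_code(code: str, max_chars: int = 1000) -> tuple[str, bool]:
--     """Truncate code content with smart line breaking."""
--     if len(code) <= max_chars:
--         return code, False
--
--     # Try to break at line boundaries
--     lines = code.split("\n")
--     truncated_lines = []
--     char_count = 0
--
--     for line in lines:
--         if char_count + len(line) + 1 > max_chars:
--             break
--         truncated_lines.append(line)
--         char_count += len(line) + 1
--
--     return "\n".join(truncated_lines) + "\n...", True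
-- ===== SOURCE B (Python) =====
-- def truncate_code(code: str, max_chars: int = 1000) -> tuple[str, bool]:
--     """Truncate code content with smart line breaking."""
--     if len(code) <= max_chars:
--         return code, False
--     # The greedy line-prefix fitting the budget ends at the last newline whose
--     # index is < max_chars (a kept line costs len+1, i.e. its newline must lie
--     # within the first max_chars characters). No split/join needed.
--     cut = code.rfind("\n", 0, max(max_chars, 0))
--     return (code[:cut] if cut != -1 else "") + "\n...", True
-- ===== Notes on version B (the rewrite author's own statement) =====
-- stated objective: alternative
-- what changed: Instead of splitting into lines and greedily accumulating per-line costs, B never splits: it locates the last newline inside the first max_chars characters with a single rfind and slices the string there (correct because a kept line's cost len+1 means exactly that its terminating newline lies before index max_chars).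
import Mathlib
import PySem

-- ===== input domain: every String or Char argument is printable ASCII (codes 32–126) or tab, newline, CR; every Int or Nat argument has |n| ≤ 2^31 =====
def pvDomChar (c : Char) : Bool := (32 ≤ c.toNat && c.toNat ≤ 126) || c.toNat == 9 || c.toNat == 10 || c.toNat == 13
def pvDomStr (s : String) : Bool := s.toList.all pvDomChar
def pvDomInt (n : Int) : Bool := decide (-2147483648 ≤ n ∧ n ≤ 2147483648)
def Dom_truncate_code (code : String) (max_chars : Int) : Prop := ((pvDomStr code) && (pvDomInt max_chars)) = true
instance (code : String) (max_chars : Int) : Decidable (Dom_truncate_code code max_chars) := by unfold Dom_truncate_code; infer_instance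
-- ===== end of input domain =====

-- B drops the split/accumulate loop entirely: it finds the last newline inside the first max_chars characters with one rfind and slices there (alternative algorithm, same asymptotics).


-- ===== PORT A =====
-- s.split("\n") ported by hand for the literal one-character separator (exact on every input:
-- splitNL [] = [[]] matches "".split("\n") == [""], and each '\n' starts a new piece)
def splitNL : List Char → List (List Char)
  | [] => [[]]
  | c :: cs =>
    match splitNL cs with
    | [] => if c = '\n' then [[], []] else [[c]]   -- unreachable: splitNL is never []
    | l :: ls => if c = '\n' then [] :: l :: ls else (c :: l) :: ls

-- the for-loop with break: accumulates truncated_lines and char_count, stops at the first line that does not fit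
def truncLoopA (max_chars : Int) : List (List Char) → List (List Char) → Int → List (List Char)
  | [], acc, _ => acc
  | l :: ls, acc, cc =>
    if cc + (l.length : Int) + 1 > max_chars then acc
    else truncLoopA max_chars ls (acc ++ [l]) (cc + (l.length : Int) + 1)

def truncate_code (code : String) (max_chars : Int) : String × Bool :=
  if PySem.Str.len code ≤ max_chars then (code, false)
  else
    let lines := splitNL code.toList
    let truncated_lines := truncLoopA max_chars lines [] 0
    -- "\n".join(truncated_lines) + "\n..." : join is List.intercalate on the char lists
    (String.ofList (List.intercalate ['\n'] truncated_lines ++ ['\n', '.', '.', '.']), true)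

-- ===== PORT B =====
-- hand port of code.rfind("\n", 0, max(max_chars, 0)): the needle is the single char '\n',
-- start is 0 and the end bound is ≥ 0, so Python searches the window code[:max(max_chars,0)]
-- (clamped to the length, which List.take does) and returns the HIGHEST index of '\n' there,
-- -1 if absent — exactly lastNL of that window.
def lastNL : List Char → Int
  | [] => -1
  | c :: cs =>
    let r := lastNL cs
    if 0 ≤ r then r + 1 else if c = '\n' then 0 else -1

def truncate_code_alt (code : String) (max_chars : Int) : String × Bool :=
  if PySem.Str.len code ≤ max_chars then (code, false)
  else
    let cut := lastNL (code.toList.take (max max_chars 0).toNat)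
    -- (code[:cut] if cut != -1 else "") + "\n..."
    (String.ofList ((if cut ≠ -1 then PySem.List.slice code.toList none (some cut) else []) ++ ['\n', '.', '.', '.']), true)

-- ===== PRECONDITION & SPEC =====
def Spec_truncate_code (code : String) (max_chars : Int) (out : String × Bool) : Prop := out = truncate_code_alt code max_chars
instance (code : String) (max_chars : Int) (out : String × Bool) : Decidable (Spec_truncate_code code max_chars out) := by unfold Spec_truncate_code; infer_instance

-- ===== CLAIM =====
def Claim_equal_truncate_code : Prop := ∀ (code : String) (max_chars : Int), Dom_truncate_code code max_chars → Spec_truncate_code code max_chars (truncate_code code max_chars)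


-- ===== LEMMAS AND PROOFS =====

-- cumulative per-line costs (len+1), used only by the proofs
def totalsB : List (List Char) → Int → List Int
  | [], _ => []
  | l :: ls, t => (t + (l.length : Int) + 1) :: totalsB ls (t + (l.length : Int) + 1)

-- number of lines whose cumulative cost fits the budget
def cnt (ls : List (List Char)) (m : Int) : Nat :=
  ((totalsB ls 0).filter (fun t => decide (t ≤ m))).length

theorem totalsB_gt (ls : List (List Char)) (t : Int) : ∀ x ∈ totalsB ls t, t < x := by
  induction ls generalizing t with
  | nil => simp [totalsB]
  | cons l ls ih =>
    intro x hx
    simp only [totalsB, List.mem_cons] at hx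
    have hlen : (0 : Int) ≤ (l.length : Int) := Int.natCast_nonneg _
    rcases hx with rfl | hx
    · omega
    · have := ih (t + (l.length : Int) + 1) x hx; omega

theorem truncLoopA_eq_take (m : Int) (ls : List (List Char)) (acc : List (List Char)) (cc : Int) :
    truncLoopA m ls acc cc =
      acc ++ ls.take ((totalsB ls cc).filter (fun t => decide (t ≤ m))).length := by
  induction ls generalizing acc cc with
  | nil => simp [truncLoopA, totalsB]
  | cons l ls ih =>
    by_cases h : cc + (l.length : Int) + 1 > m
    · have hnil : (totalsB ls (cc + (l.length : Int) + 1)).filter (fun t => decide (t ≤ m)) = [] := by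
        rw [List.filter_eq_nil_iff]
        intro x hx
        have := totalsB_gt ls (cc + (l.length : Int) + 1) x hx
        simp only [decide_eq_true_eq]
        omega
      have hfilter : (totalsB (l :: ls) cc).filter (fun t => decide (t ≤ m)) = [] := by
        simp only [totalsB, List.filter_cons, hnil]
        simp
        omega
      rw [hfilter]
      simp only [truncLoopA]
      rw [if_pos h]
      simp
    · have hfilter : (totalsB (l :: ls) cc).filter (fun t => decide (t ≤ m)) =
          (cc + (l.length : Int) + 1) :: (totalsB ls (cc + (l.length : Int) + 1)).filter (fun t => decide (t ≤ m)) := by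
        simp only [totalsB, List.filter_cons]
        simp
        omega
      rw [hfilter]
      simp only [truncLoopA]
      rw [if_neg h, ih]
      simp [List.take_succ_cons]

theorem totalsB_shift (ls : List (List Char)) (t s : Int) :
    totalsB ls (t + s) = (totalsB ls t).map (· + s) := by
  induction ls generalizing t with
  | nil => simp [totalsB]
  | cons l ls ih =>
    simp only [totalsB, List.map_cons]
    rw [show t + s + (l.length : Int) + 1 = (t + (l.length : Int) + 1) + s by ring, ih]

theorem cnt_cons (l : List Char) (ls : List (List Char)) (m : Int) :
    cnt (l :: ls) m = if (l.length : Int) + 1 ≤ m then 1 + cnt ls (m - ((l.length : Int) + 1)) else 0 := by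
  unfold cnt
  have h0 : totalsB (l :: ls) 0 = ((l.length : Int) + 1) :: (totalsB ls 0).map (· + ((l.length : Int) + 1)) := by
    have hsh := totalsB_shift ls 0 ((l.length : Int) + 1)
    simp only [totalsB]
    rw [show (0 : Int) + (l.length : Int) + 1 = 0 + ((l.length : Int) + 1) by ring, hsh]
    norm_num
  have hmapf : ((totalsB ls 0).map (· + ((l.length : Int) + 1))).filter (fun t => decide (t ≤ m)) =
      ((totalsB ls 0).filter (fun t => decide (t ≤ m - ((l.length : Int) + 1)))).map (· + ((l.length : Int) + 1)) := by
    rw [List.filter_map]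
    congr 1
    apply List.filter_congr
    intro x _
    simp only [Function.comp_apply, decide_eq_decide]
    omega
  rw [h0, List.filter_cons, hmapf]
  by_cases h1 : (l.length : Int) + 1 ≤ m
  · simp [h1, Nat.add_comm]
  · have hnil : (totalsB ls 0).filter (fun t => decide (t ≤ m - ((l.length : Int) + 1))) = [] := by
      rw [List.filter_eq_nil_iff]
      intro x hx
      have := totalsB_gt ls 0 x hx
      simp only [decide_eq_true_eq]
      omega
    simp [h1, hnil]

theorem lastNL_ge (xs : List Char) : -1 ≤ lastNL xs := by
  induction xs with
  | nil => simp [lastNL]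
  | cons c cs ih => simp only [lastNL]; split_ifs <;> omega

theorem lastNL_lt (xs : List Char) : lastNL xs < (xs.length : Int) := by
  induction xs with
  | nil => simp [lastNL]
  | cons c cs ih =>
    simp only [lastNL, List.length_cons]
    push_cast
    split_ifs <;> omega

theorem lastNL_of_not_mem (xs : List Char) (h : '\n' ∉ xs) : lastNL xs = -1 := by
  induction xs with
  | nil => simp [lastNL]
  | cons c cs ih =>
    simp only [List.mem_cons, not_or] at h
    have hc : ¬ c = '\n' := fun hh => h.1 hh.symm
    simp [lastNL, ih h.2, hc]

theorem lastNL_append (xs ys : List Char) :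
    lastNL (xs ++ ys) = if 0 ≤ lastNL ys then (xs.length : Int) + lastNL ys else lastNL xs := by
  induction xs with
  | nil =>
    have := lastNL_ge ys
    simp only [List.nil_append, List.length_nil, lastNL]
    split_ifs <;> omega
  | cons c cs ih =>
    have h1 := lastNL_ge ys
    have h2 := lastNL_ge cs
    have h3 := lastNL_ge (cs ++ ys)
    simp only [List.cons_append, lastNL, ih, List.length_cons]
    push_cast
    split_ifs <;> omega

theorem lastNL_cons_nl (xs : List Char) :
    lastNL ('\n' :: xs) = if 0 ≤ lastNL xs then lastNL xs + 1 else 0 := by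
  simp [lastNL]

theorem J_nil : List.intercalate ['\n'] ([] : List (List Char)) = [] := by
  simp [List.intercalate]

theorem J_single (l : List Char) : List.intercalate ['\n'] [l] = l := by
  simp [List.intercalate]

theorem J_cons (l : List Char) (ls : List (List Char)) (h : ls ≠ []) :
    List.intercalate ['\n'] (l :: ls) = l ++ '\n' :: List.intercalate ['\n'] ls := by
  obtain ⟨r, rs, rfl⟩ := List.exists_cons_of_ne_nil h
  simp [List.intercalate, List.intersperse_cons₂]

theorem splitNL_ne_nil (cs : List Char) : splitNL cs ≠ [] := by
  cases cs with
  | nil => simp [splitNL]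
  | cons c cs =>
    simp only [splitNL]
    cases h : splitNL cs <;> split_ifs <;> simp

theorem splitNL_eq_splitOn (cs : List Char) : splitNL cs = cs.splitOn '\n' := by
  induction cs with
  | nil => simp [splitNL]
  | cons c cs ih =>
    simp only [List.splitOn] at ih ⊢
    rw [List.splitOnP_cons]
    cases hh : splitNL cs with
    | nil => exact absurd hh (splitNL_ne_nil cs)
    | cons l ls =>
      rw [hh] at ih
      simp only [splitNL, hh]
      by_cases hc : c = '\n'
      · simp [hc, ← ih]
      · simp [hc, ← ih]

theorem intercalate_splitNL (cs : List Char) : List.intercalate ['\n'] (splitNL cs) = cs := by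
  rw [splitNL_eq_splitOn]
  exact List.intercalate_splitOn cs '\n' 

theorem splitNL_no_nl (cs : List Char) : ∀ l ∈ splitNL cs, '\n' ∉ l := by
  induction cs with
  | nil => simp [splitNL]
  | cons c cs ih =>
    intro l' hl'
    cases hh : splitNL cs with
    | nil => exact absurd hh (splitNL_ne_nil cs)
    | cons l ls =>
      rw [hh] at ih
      simp only [splitNL, hh] at hl'
      by_cases hc : c = '\n'
      · rw [if_pos hc] at hl'
        simp only [List.mem_cons] at hl'
        rcases hl' with rfl | rfl | h
        · simp
        · exact ih l' (by simp)
        · exact ih l' (by simp [h])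
      · rw [if_neg hc] at hl'
        simp only [List.mem_cons] at hl'
        rcases hl' with rfl | h
        · intro hmem
          simp only [List.mem_cons] at hmem
          rcases hmem with heq | hmem
          · exact hc heq.symm
          · exact ih l (by simp) hmem
        · exact ih l' (by simp [h])

-- the central correspondence between A's greedy line count and B's rfind cut
theorem main_lemma : ∀ (ls : List (List Char)), ls ≠ [] → (∀ l ∈ ls, '\n' ∉ l) →
    ∀ m : Int, m < ((List.intercalate ['\n'] ls).length : Int) →
    (List.intercalate ['\n'] (ls.take (cnt ls m)) =
      (if lastNL ((List.intercalate ['\n'] ls).take (max m 0).toNat) ≠ -1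
       then (List.intercalate ['\n'] ls).take (lastNL ((List.intercalate ['\n'] ls).take (max m 0).toNat)).toNat
       else []))
    ∧ ((cnt ls m = 0) ↔ lastNL ((List.intercalate ['\n'] ls).take (max m 0).toNat) = -1) := by
  intro ls
  induction ls with
  | nil => intro h; exact absurd rfl h
  | cons l rest ih =>
    intro _ hnl m hm
    by_cases hr : rest = []
    · subst hr
      rw [J_single] at hm
      have hL : ¬ ((l.length : Int) + 1 ≤ m) := by omega
      have hcnt : cnt [l] m = 0 := by rw [cnt_cons, if_neg hL]
      have hnlw : '\n' ∉ (List.intercalate ['\n'] [l]).take (max m 0).toNat := by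
        rw [J_single]
        intro hmem
        exact hnl l (by simp) (List.mem_of_mem_take hmem)
      have hlast := lastNL_of_not_mem _ hnlw
      rw [hcnt, hlast]
      simp [J_nil]
    · have hJ : List.intercalate ['\n'] (l :: rest) = l ++ '\n' :: List.intercalate ['\n'] rest :=
        J_cons l rest hr
      have hmlen : m < (l.length : Int) + 1 + (List.intercalate ['\n'] rest).length := by
        rw [hJ] at hm
        simp only [List.length_append, List.length_cons] at hm
        push_cast at hm
        omega
      by_cases h1 : (l.length : Int) + 1 ≤ m
      · -- the whole first line (plus its newline) fits
        have hm0 : max m 0 = m := by omega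
        have hmt : l.length + 1 ≤ m.toNat := by omega
        have hwin : (List.intercalate ['\n'] (l :: rest)).take (max m 0).toNat
            = l ++ '\n' :: (List.intercalate ['\n'] rest).take (m - ((l.length : Int) + 1)).toNat := by
          rw [hJ, hm0, List.take_append, List.take_of_length_le (by omega)]
          congr 1
          have hsplit : m.toNat - l.length = (m.toNat - l.length - 1) + 1 := by omega
          rw [hsplit, List.take_succ_cons]
          congr 2
          omega
        have hm' : m - ((l.length : Int) + 1) < (List.intercalate ['\n'] rest).length := by omega
        have hm'0 : (0 : Int) ≤ m - ((l.length : Int) + 1) := by omega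
        obtain ⟨IH1, IH2⟩ := ih hr (fun x hx => hnl x (by simp [hx])) (m - ((l.length : Int) + 1)) hm'
        have hmax' : max (m - ((l.length : Int) + 1)) 0 = m - ((l.length : Int) + 1) := by omega
        rw [hmax'] at IH1 IH2
        have hcnt : cnt (l :: rest) m = 1 + cnt rest (m - ((l.length : Int) + 1)) := by
          rw [cnt_cons, if_pos h1]
        have hge' := lastNL_ge ((List.intercalate ['\n'] rest).take (m - ((l.length : Int) + 1)).toNat)
        have hlt' := lastNL_lt ((List.intercalate ['\n'] rest).take (m - ((l.length : Int) + 1)).toNat)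
        by_cases h2 : 0 ≤ lastNL ((List.intercalate ['\n'] rest).take (m - ((l.length : Int) + 1)).toNat)
        · -- a newline also fits beyond the first line: cut lands in the tail
          have hcut : lastNL ((List.intercalate ['\n'] (l :: rest)).take (max m 0).toNat)
              = (l.length : Int) + 1 + lastNL ((List.intercalate ['\n'] rest).take (m - ((l.length : Int) + 1)).toNat) := by
            rw [hwin, lastNL_append, lastNL_cons_nl, if_pos h2, if_pos (by omega)]
            ring
          have hc' : cnt rest (m - ((l.length : Int) + 1)) ≠ 0 := by
            intro h0
            have := IH2.mp h0
            omega
          have htk : rest.take (cnt rest (m - ((l.length : Int) + 1))) ≠ [] := by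
            obtain ⟨r, rs, rfl⟩ := List.exists_cons_of_ne_nil hr
            obtain ⟨k, hk⟩ := Nat.exists_eq_succ_of_ne_zero hc'
            rw [hk]
            simp
          have hLHS : List.intercalate ['\n'] ((l :: rest).take (cnt (l :: rest) m))
              = l ++ '\n' :: (List.intercalate ['\n'] rest).take
                  (lastNL ((List.intercalate ['\n'] rest).take (m - ((l.length : Int) + 1)).toNat)).toNat := by
            rw [hcnt, Nat.add_comm, List.take_succ_cons, J_cons _ _ htk, IH1, if_pos (by omega)]
          have hRHS : (List.intercalate ['\n'] (l :: rest)).take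
              (lastNL ((List.intercalate ['\n'] (l :: rest)).take (max m 0).toNat)).toNat
              = l ++ '\n' :: (List.intercalate ['\n'] rest).take
                  (lastNL ((List.intercalate ['\n'] rest).take (m - ((l.length : Int) + 1)).toNat)).toNat := by
            rw [hcut, hJ, List.take_append, List.take_of_length_le (by omega)]
            congr 1
            have hsplit : ((l.length : Int) + 1 + lastNL ((List.intercalate ['\n'] rest).take (m - ((l.length : Int) + 1)).toNat)).toNat - l.length
                = (lastNL ((List.intercalate ['\n'] rest).take (m - ((l.length : Int) + 1)).toNat)).toNat + 1 := by
              omega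
            rw [hsplit, List.take_succ_cons]
          constructor
          · rw [hLHS, if_pos (by omega), hRHS]
          · constructor
            · intro h0; omega
            · intro h0; omega
        · -- no newline beyond the first line: the cut is exactly at the end of line l
          have hlast' : lastNL ((List.intercalate ['\n'] rest).take (m - ((l.length : Int) + 1)).toNat) = -1 := by omega
          have hcut : lastNL ((List.intercalate ['\n'] (l :: rest)).take (max m 0).toNat) = (l.length : Int) := by
            rw [hwin, lastNL_append, lastNL_cons_nl, if_neg h2, if_pos (by omega)]
            ring
          have hc' : cnt rest (m - ((l.length : Int) + 1)) = 0 := IH2.mpr hlast'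
          have hLHS : List.intercalate ['\n'] ((l :: rest).take (cnt (l :: rest) m)) = l := by
            rw [hcnt, hc', List.take_succ_cons, List.take_zero, J_single]
          have hRHS : (List.intercalate ['\n'] (l :: rest)).take
              (lastNL ((List.intercalate ['\n'] (l :: rest)).take (max m 0).toNat)).toNat = l := by
            rw [hcut, hJ]
            have : ((l.length : Int)).toNat = l.length := by omega
            rw [this, List.take_left]
          constructor
          · rw [hLHS, if_pos (by omega), hRHS]
          · constructor
            · intro h0; rw [hcnt] at h0; omega
            · intro h0; omega
      · -- even the first line does not fit
        have hcnt : cnt (l :: rest) m = 0 := by rw [cnt_cons, if_neg h1]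
        have hk : (max m 0).toNat ≤ l.length := by omega
        have hwin : (List.intercalate ['\n'] (l :: rest)).take (max m 0).toNat = l.take (max m 0).toNat := by
          rw [hJ, List.take_append_of_le_length hk]
        have hlast : lastNL ((List.intercalate ['\n'] (l :: rest)).take (max m 0).toNat) = -1 := by
          rw [hwin]
          exact lastNL_of_not_mem _ (fun hmem => hnl l (by simp) (List.mem_of_mem_take hmem))
        rw [hcnt, hlast]
        simp [J_nil]

-- ===== VERDICT =====
theorem truncate_code_spec : Claim_equal_truncate_code := by
  intro code max_chars _
  unfold Spec_truncate_code truncate_code truncate_code_alt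
  by_cases h : PySem.Str.len code ≤ max_chars
  · rw [if_pos h, if_pos h]
  · rw [if_neg h, if_neg h]
    dsimp only
    have hm : max_chars < (code.toList.length : Int) := by
      simp only [PySem.Str.len_eq] at h
      omega
    have hJ : List.intercalate ['\n'] (splitNL code.toList) = code.toList := intercalate_splitNL _
    have hmJ : max_chars < ((List.intercalate ['\n'] (splitNL code.toList)).length : Int) := by
      rw [hJ]; exact hm
    obtain ⟨H1, _⟩ := main_lemma (splitNL code.toList) (splitNL_ne_nil _) (splitNL_no_nl _) max_chars hmJ
    rw [hJ] at H1
    rw [truncLoopA_eq_take, List.nil_append]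
    rw [show ((totalsB (splitNL code.toList) 0).filter (fun t => decide (t ≤ max_chars))).length
        = cnt (splitNL code.toList) max_chars from rfl]
    rw [H1]
    have hge := lastNL_ge (code.toList.take (max max_chars 0).toNat)
    by_cases hc : lastNL (code.toList.take (max max_chars 0).toNat) = -1
    · rw [if_neg (by simpa using hc), if_neg (by simpa using hc)]
    · rw [if_pos hc, if_pos hc, PySem.List.slice_to _ (by omega)]
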